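-- pv_equiv track=rewrite | github.com/MD-ARMAN-Shanto/Problem-Solving | List/day_3.py | score_records
-- ===== SOURCE A (Python) =====
-- def score_records(score_list):
--     highest_score = score_list[0]
--     lowest_score = score_list[0]
--
--     highest_score_count = 0
--     lowest_score_count = 0
--
--     for i in range(len(score_list)):
--         if highest_score < score_list[i]:
--             highest_score = score_list[i]
--             highest_score_count += 1
--         elif score_list[i] < lowest_score:
--             lowest_score = score_list[i]
--             lowest_score_count += 1
--     return [highest_score_count, lowest_score_count]
-- ===== SOURCE B (Python) =====
-- def score_records(score_list):
--     # prefix running-max / running-min tables, then count strict transitions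
--     maxes = []
--     mins = []
--     for x in score_list:
--         maxes.append(x if not maxes else max(maxes[-1], x))
--         mins.append(x if not mins else min(mins[-1], x))
--     hi = sum(1 for a, b in zip(maxes, maxes[1:]) if a < b)
--     lo = sum(1 for a, b in zip(mins, mins[1:]) if b < a)
--     return [hi, lo]
-- ===== Notes on version B (the rewrite author's own statement) =====
-- stated objective: alternative
-- what changed: Replaces A's single fused loop with four mutable counters by building running-max and running-min prefix tables and counting strict transitions between adjacent table entries.
import Mathlib
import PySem

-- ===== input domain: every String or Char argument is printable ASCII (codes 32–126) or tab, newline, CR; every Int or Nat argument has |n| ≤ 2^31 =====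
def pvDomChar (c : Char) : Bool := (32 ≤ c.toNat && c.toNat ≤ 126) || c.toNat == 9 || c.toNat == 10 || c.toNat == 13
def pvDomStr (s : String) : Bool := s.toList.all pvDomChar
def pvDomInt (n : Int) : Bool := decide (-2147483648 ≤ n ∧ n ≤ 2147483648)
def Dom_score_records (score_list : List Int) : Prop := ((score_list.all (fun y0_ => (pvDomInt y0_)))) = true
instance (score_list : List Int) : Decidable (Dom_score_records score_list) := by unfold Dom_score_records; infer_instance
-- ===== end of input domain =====

-- B replaces A's fused loop (four mutable counters) by running-max/min prefix tables plus
-- transition counting; equal results are proved on all non-empty lists (A raises IndexError on []).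

-- ===== PORT A =====
-- the for-loop: state (highest, lowest, hi_count, lo_count), iterating over the elements
def scoreLoopA : List Int → Int → Int → Int → Int → List Int
  | [], _, _, hc, lc => [hc, lc]
  | x :: xs, hi, lo, hc, lc =>
    if hi < x then scoreLoopA xs x lo (hc + 1) lc
    else if x < lo then scoreLoopA xs hi x hc (lc + 1)
    else scoreLoopA xs hi lo hc lc

def score_records (score_list : List Int) : List Int :=
  match score_list with
  | [] => []      -- score_list[0] raises IndexError here; excluded by Pre_score_records
  | h :: _ => scoreLoopA score_list h h 0 0

-- ===== PORT B =====
-- the table-building loop: append f(last, x) (or x when the table is empty), carrying the last entry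
def pvScan (f : Int → Int → Int) : List Int → Option Int → List Int
  | [], _ => []
  | x :: xs, none => x :: pvScan f xs (some x)
  | x :: xs, some m => f m x :: pvScan f xs (some (f m x))

-- sum(1 for a, b in zip(l, l[1:]) if cmp a b)
def pvCountPairs (cmp : Int → Int → Bool) (l : List Int) : Int :=
  (l.zip l.tail).foldl (fun c p => if cmp p.1 p.2 then c + 1 else c) 0

def score_records_alt (score_list : List Int) : List Int :=
  let maxes := pvScan max score_list none
  let mins := pvScan min score_list none
  [pvCountPairs (fun a b => a < b) maxes, pvCountPairs (fun a b => b < a) mins]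

-- ===== PRECONDITION & SPEC =====
-- A raises IndexError on the empty list (score_list[0]); Pre_ excludes exactly that input.
def Pre_score_records (score_list : List Int) : Prop := score_list ≠ []
instance (score_list : List Int) : Decidable (Pre_score_records score_list) := by unfold Pre_score_records; infer_instance
def pvWitness_score_records : List Int := [3, 1, 4]

def Spec_score_records (score_list : List Int) (out : List Int) : Prop := out = score_records_alt score_list
instance (score_list : List Int) (out : List Int) : Decidable (Spec_score_records score_list out) := by unfold Spec_score_records; infer_instance

-- ===== CLAIM (what is proved, stated in full; the proofs are below) =====
def Claim_equal_score_records : Prop := ∀ (score_list : List Int), Dom_score_records score_list → Pre_score_records score_list → Spec_score_records score_list (score_records score_list)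
-- ===== LEMMAS AND PROOFS =====
-- number of strict increases of the running maximum starting from m
def cntUp : Int → List Int → Int
  | _, [] => 0
  | m, x :: xs => (if m < x then 1 else 0) + cntUp (max m x) xs

def cntDn : Int → List Int → Int
  | _, [] => 0
  | m, x :: xs => (if x < m then 1 else 0) + cntDn (min m x) xs

theorem scoreLoopA_eq (t : List Int) : ∀ hi lo hc lc, lo ≤ hi →
    scoreLoopA t hi lo hc lc = [hc + cntUp hi t, lc + cntDn lo t] := by
  induction t with
  | nil => intro hi lo hc lc _; simp [scoreLoopA, cntUp, cntDn]
  | cons x xs ih =>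
    intro hi lo hc lc hle
    by_cases h1 : hi < x
    · have hx : ¬ x < lo := by omega
      have hmax : max hi x = x := by omega
      have hmin : min lo x = lo := by omega
      simp [scoreLoopA, h1, cntUp, cntDn, hx, hmax, hmin, ih x lo (hc + 1) lc (by omega)]
      ring
    · by_cases h2 : x < lo
      · have hmax : max hi x = hi := by omega
        have hmin : min lo x = x := by omega
        simp [scoreLoopA, h1, h2, cntUp, cntDn, hmax, hmin, ih hi x hc (lc + 1) (by omega)]
        ring
      · have hmax : max hi x = hi := by omega
        have hmin : min lo x = lo := by omega
        simp [scoreLoopA, h1, h2, cntUp, cntDn, hmax, hmin, ih hi lo hc lc hle]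

theorem countUp_scan (t : List Int) : ∀ m c,
    (((m :: pvScan max t (some m)).zip (pvScan max t (some m))).foldl
      (fun c p => if p.1 < p.2 then c + 1 else c) c) = c + cntUp m t := by
  induction t with
  | nil => intro m c; simp [pvScan, cntUp]
  | cons x xs ih =>
    intro m c
    have hiff : (m < max m x) = (m < x) := by
      by_cases h : m < x <;> simp [h] <;> omega
    simp only [pvScan, List.zip_cons_cons, List.foldl_cons, ih]
    by_cases h : m < x <;> simp [hiff, h, cntUp, max_comm] <;> by_cases h' : m < x <;> simp_all <;> ring_nf <;> omega

theorem countDn_scan (t : List Int) : ∀ m c,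
    (((m :: pvScan min t (some m)).zip (pvScan min t (some m))).foldl
      (fun c p => if p.2 < p.1 then c + 1 else c) c) = c + cntDn m t := by
  induction t with
  | nil => intro m c; simp [pvScan, cntDn]
  | cons x xs ih =>
    intro m c
    have hiff : (min m x < m) = (x < m) := by
      by_cases h : x < m <;> simp [h] <;> omega
    simp only [pvScan, List.zip_cons_cons, List.foldl_cons, ih]
    by_cases h : x < m <;> simp [hiff, h, cntDn, min_comm] <;> by_cases h' : x < m <;> simp_all <;> ring_nf <;> omega

-- ===== VERDICT (by name: the statement is the Claim_ definition above) =====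
theorem score_records_spec : Claim_equal_score_records := by
  intro score_list _ hpre
  unfold Spec_score_records
  match score_list with
  | [] => exact absurd rfl hpre
  | h :: t =>
    have hA : score_records (h :: t) = [cntUp h t, cntDn h t] := by
      simp [score_records, scoreLoopA, scoreLoopA_eq t h h 0 0 le_rfl]
    have hB : score_records_alt (h :: t) = [cntUp h t, cntDn h t] := by
      simp only [score_records_alt, pvScan, pvCountPairs, List.tail_cons,
        decide_eq_true_eq]
      rw [countUp_scan, countDn_scan]; simp
    rw [hA, hB]
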